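-- pv_equiv track=rewrite | github.com/Si-36/osiris | ast_syntax_fixer.py | get_expected_indent
-- ===== SOURCE A (Python) =====
-- from typing import List, Tuple
--
-- def get_expected_indent(lines: List[str], line_idx: int) -> int:
--     """Get expected indentation for a line."""
--     # Look backward for context
--     for i in range(line_idx - 1, -1, -1):
--         line = lines[i].strip()
--         if not line or line.startswith('#'):
--             continue
--
--         indent = len(lines[i]) - len(lines[i].lstrip())
--
--         # If previous line ends with :, we need more indent
--         if line.endswith(':'):
--             return indent + 4
--         else:
--             return indent
--
--     return 0
-- ===== SOURCE B (Python) =====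
-- from typing import List, Tuple
--
-- def get_expected_indent(lines: List[str], line_idx: int) -> int:
--     """Get expected indentation for a line (forward pass keeping the last meaningful line)."""
--     last = None  # (indent, ends_with_colon) of the most recent meaningful line seen
--     for i in range(line_idx):
--         stripped = lines[i].strip()
--         if stripped and not stripped.startswith('#'):
--             last = (len(lines[i]) - len(lines[i].lstrip()), stripped.endswith(':'))
--     if last is None:
--         return 0
--     indent, colon = last
--     return indent + 4 if colon else indent
-- ===== Notes on version B (the rewrite author's own statement) =====
-- stated objective: alternative
-- what changed: Replaces A's backward early-exit scan from line_idx-1 with a single forward pass over lines[0:line_idx] that keeps (indent, ends-with-colon) of the last meaningful line seen, deciding the result after the loop.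
import Mathlib
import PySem

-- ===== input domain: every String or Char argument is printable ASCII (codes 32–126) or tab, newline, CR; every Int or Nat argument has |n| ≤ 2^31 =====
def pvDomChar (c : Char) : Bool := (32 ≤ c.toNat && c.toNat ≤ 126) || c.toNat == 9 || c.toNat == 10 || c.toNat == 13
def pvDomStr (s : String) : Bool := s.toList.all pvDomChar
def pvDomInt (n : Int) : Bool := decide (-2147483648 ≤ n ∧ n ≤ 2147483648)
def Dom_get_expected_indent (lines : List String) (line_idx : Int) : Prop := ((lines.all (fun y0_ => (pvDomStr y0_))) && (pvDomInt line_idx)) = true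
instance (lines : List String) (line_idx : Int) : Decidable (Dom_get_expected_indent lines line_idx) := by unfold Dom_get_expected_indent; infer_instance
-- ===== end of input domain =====

-- B scans forward keeping the last meaningful line instead of A's backward early-exit scan; alternative decomposition, same cost.
-- ===== PORT A =====
-- the backward loop 'for i in range(line_idx-1, -1, -1)': aLoopA lines (k+1) handles index k, counting down
def aLoopA (lines : List String) : Nat → Int
  | 0 => 0
  | k + 1 =>
    let raw := (PySem.List.pyGet? lines (k : Int)).getD ""
    let line := PySem.Str.strip raw
    if line = "" ∨ PySem.Str.startswith line "#" = true then aLoopA lines k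
    else
      let indent : Int := PySem.Str.len raw - PySem.Str.len (PySem.Str.lstrip raw)
      if PySem.Str.endswith line ":" = true then indent + 4 else indent

def get_expected_indent (lines : List String) (line_idx : Int) : Int :=
  aLoopA lines line_idx.toNat

-- ===== PORT B =====
-- loop body: overwrite the record when the line is meaningful
def bStep (lines : List String) (st : Option (Int × Bool)) (i : Int) : Option (Int × Bool) :=
  let raw := (PySem.List.pyGet? lines i).getD ""
  let stripped := PySem.Str.strip raw
  if stripped ≠ "" ∧ PySem.Str.startswith stripped "#" = false then
    some (PySem.Str.len raw - PySem.Str.len (PySem.Str.lstrip raw), PySem.Str.endswith stripped ":")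
  else st

def bFin : Option (Int × Bool) → Int
  | none => 0
  | some (indent, colon) => if colon then indent + 4 else indent

def get_expected_indent_alt (lines : List String) (line_idx : Int) : Int :=
  bFin ((PySem.List.pyRange 0 line_idx 1).foldl (bStep lines) none)

-- ===== PRECONDITION & SPEC =====
-- Pre_ excludes exactly the inputs where the Python A raises IndexError: line_idx larger than len(lines).
def Pre_get_expected_indent (lines : List String) (line_idx : Int) : Prop :=
  line_idx ≤ (lines.length : Int)
instance (lines : List String) (line_idx : Int) : Decidable (Pre_get_expected_indent lines line_idx) := by unfold Pre_get_expected_indent; infer_instance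
def pvWitness_get_expected_indent : List String × Int := (["def f():", "  pass"], 1)

def Spec_get_expected_indent (lines : List String) (line_idx : Int) (out : Int) : Prop := out = get_expected_indent_alt lines line_idx
instance (lines : List String) (line_idx : Int) (out : Int) : Decidable (Spec_get_expected_indent lines line_idx out) := by unfold Spec_get_expected_indent; infer_instance

-- ===== CLAIM (what is proved, stated in full; the proofs are below) =====
def Claim_equal_get_expected_indent : Prop := ∀ (lines : List String) (line_idx : Int), Dom_get_expected_indent lines line_idx → Pre_get_expected_indent lines line_idx → Spec_get_expected_indent lines line_idx (get_expected_indent lines line_idx)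

-- ===== LEMMAS AND PROOFS =====

-- forward fold over indices 0..n-1 finalised = backward early-exit scan from n-1
theorem bFin_fold_eq_aLoopA (lines : List String) (n : Nat) :
    bFin (((List.range n).map (fun k : Nat => (k : Int))).foldl (bStep lines) none) = aLoopA lines n := by
  induction n with
  | zero => rfl
  | succ n ih =>
    rw [List.range_succ, List.map_append, List.foldl_append]
    simp only [List.map_cons, List.map_nil, List.foldl_cons, List.foldl_nil]
    simp only [aLoopA, bStep]
    by_cases h1 : PySem.Str.strip ((PySem.List.pyGet? lines (n : Int)).getD "") = ""
    · rw [if_neg (fun hc => hc.1 h1), if_pos (Or.inl h1)]; exact ih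
    · by_cases h2 : PySem.Str.startswith (PySem.Str.strip ((PySem.List.pyGet? lines (n : Int)).getD "")) "#" = true
      · rw [if_neg (fun hc => by rw [hc.2] at h2; exact Bool.false_ne_true h2), if_pos (Or.inr h2)]
        exact ih
      · rw [if_pos ⟨h1, Bool.eq_false_iff.mpr h2⟩, if_neg (fun hc => hc.elim h1 h2)]
        rfl

-- ===== VERDICT (by name: the statement is the Claim_ definition above) =====
theorem get_expected_indent_spec : Claim_equal_get_expected_indent := by
  intro lines line_idx _ _
  unfold Spec_get_expected_indent get_expected_indent get_expected_indent_alt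
  rw [PySem.List.pyRange_one]
  have : (line_idx - 0).toNat = line_idx.toNat := by omega
  rw [this]
  simp only [zero_add]
  rw [bFin_fold_eq_aLoopA]
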